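-- pv_equiv track=rewrite | github.com/abhineetjain13/Crawlwise | backend/app/services/acquisition/policy.py | matches_domain_policy
-- ===== SOURCE A (Python) =====
-- def matches_domain_policy(domain: str, candidates: list[str]) -> bool:
--     normalized_domain = str(domain or "").strip().lower()
--     for candidate in (
--         str(candidate or "").strip().lower() for candidate in candidates if candidate
--     ):
--         if normalized_domain == candidate or normalized_domain.endswith(f".{candidate}"):
--             return True
--     return False
-- ===== SOURCE B (Python) =====
-- def matches_domain_policy(domain: str, candidates: list[str]) -> bool:
--     table = set()
--     for c in candidates:
--         if c:
--             table.add(str(c or "").strip().lower())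
--     suffix = str(domain or "").strip().lower()
--     while True:
--         if suffix in table:
--             return True
--         dot = suffix.find(".")
--         if dot == -1:
--             return False
--         suffix = suffix[dot + 1:]
-- ===== Notes on version B (the rewrite author's own statement) =====
-- stated objective: alternative
-- what changed: B builds a set of normalized candidates once with an explicit loop and then walks the DOMAIN itself in a while loop, jumping from one dot to the next with find and probing each suffix against the set, instead of scanning the candidate list and running an endswith test per candidate.
import Mathlib
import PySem

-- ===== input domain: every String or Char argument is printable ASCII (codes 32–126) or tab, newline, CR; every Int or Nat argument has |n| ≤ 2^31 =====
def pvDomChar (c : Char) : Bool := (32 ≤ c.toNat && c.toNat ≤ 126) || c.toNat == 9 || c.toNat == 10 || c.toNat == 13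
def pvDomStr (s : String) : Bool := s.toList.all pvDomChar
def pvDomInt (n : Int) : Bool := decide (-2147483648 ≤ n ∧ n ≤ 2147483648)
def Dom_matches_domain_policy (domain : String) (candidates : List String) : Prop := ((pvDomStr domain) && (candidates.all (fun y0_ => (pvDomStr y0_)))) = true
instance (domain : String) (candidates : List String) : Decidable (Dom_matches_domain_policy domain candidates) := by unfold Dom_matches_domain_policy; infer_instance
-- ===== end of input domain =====

-- B builds a set of normalized candidates once and then walks the domain itself,
-- jumping from dot to dot with find and testing each suffix against the set,
-- instead of scanning the candidate list with an endswith test per candidate (alternative).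

-- ===== PORT A =====
def matches_domain_policy (domain : String) (candidates : List String) : Bool :=
  let nd := PySem.Chars.lower (PySem.Chars.strip domain.toList)
  ((candidates.filter (fun c => !c.toList.isEmpty)).map
      (fun c => PySem.Chars.lower (PySem.Chars.strip c.toList))).any
    (fun cn => nd == cn || PySem.Chars.endswith nd ('.' :: cn))

-- ===== PORT B =====
-- the while loop of Source B: test the suffix, then jump past the first dot
-- (suffix[dot+1:] with dot = suffix.find(".") ≥ 0 is exactly List.drop (dot+1))
def pvChase (table : PySem.Set (List Char)) (s : List Char) : Bool :=
  if PySem.Set.contains table s then true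
  else if PySem.Chars.find s ['.'] = -1 then false
  else pvChase table (s.drop ((PySem.Chars.find s ['.']).toNat + 1))
termination_by s.length
decreasing_by
  have h : ['.'] <:+: s := (PySem.Chars.find_ne_neg_one_iff s ['.']).mp (by assumption)
  have h1 : 1 ≤ s.length := by simpa using h.sublist.length_le
  simp only [List.length_drop]
  omega

def matches_domain_policy_alt (domain : String) (candidates : List String) : Bool :=
  let table : PySem.Set (List Char) :=
    candidates.foldl (fun s c =>
      if c.toList.isEmpty then s
      else PySem.Set.add s (PySem.Chars.lower (PySem.Chars.strip c.toList)))
      PySem.Set.empty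
  pvChase table (PySem.Chars.lower (PySem.Chars.strip domain.toList))

-- ===== PRECONDITION & SPEC =====
def Spec_matches_domain_policy (domain : String) (candidates : List String) (out : Bool) : Prop := out = matches_domain_policy_alt domain candidates
instance (domain : String) (candidates : List String) (out : Bool) : Decidable (Spec_matches_domain_policy domain candidates out) := by unfold Spec_matches_domain_policy; infer_instance

-- ===== CLAIM (what is proved, stated in full; the proofs are below) =====
def Claim_equal_matches_domain_policy : Prop := ∀ (domain : String) (candidates : List String), Dom_matches_domain_policy domain candidates → Spec_matches_domain_policy domain candidates (matches_domain_policy domain candidates)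

-- ===== LEMMAS AND PROOFS =====

-- membership in the table built by B's for-loop = membership in A's normalized candidate list
lemma contains_build (candidates : List String) (acc : PySem.Set (List Char)) (y : List Char) :
    PySem.Set.contains
      (candidates.foldl (fun s c =>
        if c.toList.isEmpty then s
        else PySem.Set.add s (PySem.Chars.lower (PySem.Chars.strip c.toList))) acc) y = true ↔
    y ∈ acc ∨ y ∈ (candidates.filter (fun c => !c.toList.isEmpty)).map
      (fun c => PySem.Chars.lower (PySem.Chars.strip c.toList)) := by
  rw [PySem.Set.contains_iff]
  induction candidates generalizing acc with
  | nil => simp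
  | cons c cs ih =>
    rw [List.foldl_cons, List.filter_cons]
    by_cases hc : c.toList.isEmpty
    · rw [if_pos hc, ih]
      simp [hc]
    · rw [if_neg hc, ih]
      simp only [hc, Bool.not_false, if_pos, List.map_cons, List.mem_cons,
        PySem.Set.mem_add]
      tauto

-- when s has a dot, find points at the first one and s splits around it
lemma first_dot_decomp (s : List Char) (h : PySem.Chars.find s ['.'] ≠ -1) :
    s = s.take (PySem.Chars.find s ['.']).toNat ++
        '.' :: s.drop ((PySem.Chars.find s ['.']).toNat + 1) := by
  have h0 : 0 ≤ PySem.Chars.find s ['.'] := by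
    have := PySem.Chars.neg_one_le_find s ['.']
    omega
  obtain ⟨hpre, -⟩ := PySem.Chars.find_spec (s := s) (sub := ['.']) h0
  obtain ⟨r, hr⟩ := hpre
  have hdrop1 : s.drop ((PySem.Chars.find s ['.']).toNat + 1) = r := by
    have : (s.drop (PySem.Chars.find s ['.']).toNat).drop 1 = r := by
      rw [← hr]; simp
    simpa [List.drop_drop, Nat.add_comm] using this
  conv_lhs => rw [← List.take_append_drop (PySem.Chars.find s ['.']).toNat s]
  rw [← hr, hdrop1]
  simp

-- the dot-suffixes of s are: the tail after the FIRST dot, plus its own dot-suffixes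
lemma split_dotsuffix (s cn : List Char) (h : PySem.Chars.find s ['.'] ≠ -1) :
    (∃ t, s = t ++ '.' :: cn) ↔
    (cn = s.drop ((PySem.Chars.find s ['.']).toNat + 1) ∨
     ∃ t, s.drop ((PySem.Chars.find s ['.']).toNat + 1) = t ++ '.' :: cn) := by
  have h0 : 0 ≤ PySem.Chars.find s ['.'] := by
    have := PySem.Chars.neg_one_le_find s ['.']
    omega
  set i := (PySem.Chars.find s ['.']).toNat with hi
  obtain ⟨-, hmin⟩ := PySem.Chars.find_spec (s := s) (sub := ['.']) h0
  have hdec := first_dot_decomp s h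
  constructor
  · rintro ⟨t, hts⟩
    have hdot_t : ['.'] <+: s.drop t.length := by
      rw [hts, List.drop_left]
      exact ⟨cn, rfl⟩
    have hle : i ≤ t.length := by
      by_contra hlt
      exact hmin t.length (by omega) hdot_t
    rcases Nat.eq_or_lt_of_le hle with heq | hlt
    · left
      have htake : s.take i = t := by
        rw [hts, heq, List.take_left]
      have hthis : s.take i ++ '.' :: s.drop (i + 1) = t ++ '.' :: cn := by
        rw [← hdec]; exact hts
      rw [htake] at hthis
      have h2 := List.append_cancel_left hthis
      injection h2 with _ h3
      exact h3.symm
    · right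
      refine ⟨t.drop (i + 1), ?_⟩
      rw [hts, List.drop_append_of_le_length (by omega)]
  · rintro (rfl | ⟨t, ht⟩)
    · exact ⟨s.take i, hdec⟩
    · refine ⟨s.take i ++ '.' :: t, ?_⟩
      conv_lhs => rw [hdec, ht]
      simp [hi]

-- pvChase finds exactly the table elements that are dot-suffixes of s
lemma chase_iff (table : PySem.Set (List Char)) (s : List Char) :
    pvChase table s = true ↔
    ∃ cn, PySem.Set.contains table cn = true ∧ (s = cn ∨ ∃ t, s = t ++ '.' :: cn) := by
  fun_induction pvChase with
  | case1 s hc =>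
    exact iff_of_true rfl ⟨s, hc, Or.inl rfl⟩
  | case2 s hc hfind =>
    simp only [Bool.false_eq_true, false_iff, not_exists, not_and]
    rintro cn hmem (rfl | ⟨t, rfl⟩)
    · exact hc hmem
    · exact absurd ⟨t, cn, by simp⟩ ((PySem.Chars.find_eq_neg_one_iff _ _).mp hfind)
  | case3 s hc hfind ih =>
    rw [ih]
    constructor
    · rintro ⟨cn, hmem, hcase⟩
      refine ⟨cn, hmem, Or.inr ?_⟩
      refine (split_dotsuffix s cn hfind).mpr ?_
      rcases hcase with h | h
      · exact Or.inl h.symm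
      · exact Or.inr h
    · rintro ⟨cn, hmem, (rfl | hsuf)⟩
      · exact absurd hmem hc
      · refine ⟨cn, hmem, ?_⟩
        rcases (split_dotsuffix s cn hfind).mp hsuf with h | h
        · exact Or.inl h.symm
        · exact Or.inr h

-- ===== VERDICT (by name: the statement is the Claim_ definition above) =====
theorem matches_domain_policy_spec : Claim_equal_matches_domain_policy := by
  intro domain candidates _
  unfold Spec_matches_domain_policy matches_domain_policy matches_domain_policy_alt
  rw [Bool.eq_iff_iff]
  rw [chase_iff]
  simp only [List.any_eq_true, Bool.or_eq_true, beq_iff_eq, PySem.Chars.endswith_iff,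
    contains_build, PySem.Set.empty, List.not_mem_nil, false_or]
  constructor
  · rintro ⟨cn, hmem, (h | ⟨t, ht⟩)⟩
    · exact ⟨cn, hmem, Or.inl h⟩
    · exact ⟨cn, hmem, Or.inr ⟨t, ht.symm⟩⟩
  · rintro ⟨cn, hmem, (h | ⟨t, ht⟩)⟩
    · exact ⟨cn, hmem, Or.inl h⟩
    · exact ⟨cn, hmem, Or.inr ⟨t, ht.symm⟩⟩
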